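-- pv_equiv track=rewrite | github.com/ImperialCQD/Strong-Coupling-Quantum-Logic-of-Trapped-Ions | lib/op.py | _motion_mul
-- ===== SOURCE A (Python) =====
-- def _motion_mul(left, right):
--     cl, dl = left
--     cr, dr = right
--     if dl == 0:
--         return [(1, (cl+cr, dr))]
--     if cr == 0:
--         return [(1, (cl, dl+dr))]
--     min_ = dl if dl < cr else cr
--     coeffs = [1] * (min_ + 1)
--     for k in range(1, min_ + 1):
--         coeffs[k] = (coeffs[k-1] * (dl - k + 1) * (cr - k + 1)) // k
--     return [(coeff, (cl+cr-k, dl+dr-k)) for k, coeff in enumerate(coeffs)]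
-- ===== SOURCE B (Python) =====
-- import math
--
-- def _motion_mul(left, right):
--     cl, dl = left
--     cr, dr = right
--     if dl == 0 or cr == 0:
--         return [(1, (cl + cr, dl + dr))]
--     return [(math.comb(dl, k) * math.comb(cr, k) * math.factorial(k),
--              (cl + cr - k, dl + dr - k))
--             for k in range(min(dl, cr) + 1)]
-- ===== Notes on version B (the rewrite author's own statement) =====
-- stated objective: simpler
-- what changed: Each coefficient is computed independently by the closed form comb(dl,k)*comb(cr,k)*k! instead of A's accumulating integer recurrence written into a pre-allocated list, and one unified guard replaces A's two special-case branches; B trades speed on very large exponents for this directness.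
import Mathlib
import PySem

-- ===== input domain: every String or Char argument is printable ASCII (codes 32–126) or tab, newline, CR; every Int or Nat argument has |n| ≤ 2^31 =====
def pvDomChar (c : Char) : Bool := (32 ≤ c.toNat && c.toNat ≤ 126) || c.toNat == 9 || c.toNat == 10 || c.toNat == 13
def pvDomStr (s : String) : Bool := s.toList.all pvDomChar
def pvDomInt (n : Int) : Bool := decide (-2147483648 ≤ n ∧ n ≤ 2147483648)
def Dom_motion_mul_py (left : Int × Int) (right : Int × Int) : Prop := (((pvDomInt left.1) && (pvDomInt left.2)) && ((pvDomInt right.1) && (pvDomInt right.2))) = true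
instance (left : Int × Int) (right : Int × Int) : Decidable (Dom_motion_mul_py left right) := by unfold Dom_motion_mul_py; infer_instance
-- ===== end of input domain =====

-- B replaces A's accumulating integer-recurrence over the coefficient list by a direct
-- closed-form coefficient comb(dl,k)*comb(cr,k)*k! per term, subsuming A's two guard
-- branches into one; objective: simpler.

-- ===== PORT A =====
def motion_mul_py (left : Int × Int) (right : Int × Int) : List (Int × (Int × Int)) :=
  let cl := left.1
  let dl := left.2
  let cr := right.1
  let dr := right.2
  if dl = 0 then [(1, (cl + cr, dr))]
  else if cr = 0 then [(1, (cl, dl + dr))]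
  else
    let min_ : Int := if dl < cr then dl else cr
    let coeffs0 : List Int := PySem.List.pyRepeat [1] (min_ + 1)
    -- the loop writes cs[k] (0 ≤ k < len cs) from cs[k-1]; set/getD are exact in range
    let coeffs := (PySem.List.pyRange 1 (min_ + 1) 1).foldl
      (fun cs k =>
        cs.set k.toNat
          (PySem.Int.floordiv (PySem.List.pyGetD cs (k - 1) 0 * (dl - k + 1) * (cr - k + 1)) k))
      coeffs0
    (PySem.List.enumerate coeffs 0).map (fun p => (p.2, (cl + cr - p.1, dl + dr - p.1)))

-- ===== PORT B =====
def motion_mul_py_alt (left : Int × Int) (right : Int × Int) : List (Int × (Int × Int)) :=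
  let cl := left.1
  let dl := left.2
  let cr := right.1
  let dr := right.2
  if dl = 0 ∨ cr = 0 then [(1, (cl + cr, dl + dr))]
  else
    (List.range (min dl cr + 1).toNat).map (fun k =>
      (((dl.toNat.choose k * cr.toNat.choose k * Nat.factorial k : Nat) : Int),
       (cl + cr - (k : Int), dl + dr - (k : Int))))

-- ===== PRECONDITION & SPEC =====
def Spec_motion_mul_py (left : Int × Int) (right : Int × Int) (out : List (Int × (Int × Int))) : Prop := out = motion_mul_py_alt left right
instance (left : Int × Int) (right : Int × Int) (out : List (Int × (Int × Int))) : Decidable (Spec_motion_mul_py left right out) := by unfold Spec_motion_mul_py; infer_instance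

-- ===== CLAIM (what is proved, stated in full; the proofs are below) =====
def Claim_equal_motion_mul_py : Prop := ∀ (left : Int × Int) (right : Int × Int), Dom_motion_mul_py left right → Spec_motion_mul_py left right (motion_mul_py left right)

-- ===== LEMMAS AND PROOFS =====

/-- the closed-form coefficient -/
def pvCoef (dn cn k : Nat) : Int := ((dn.choose k * cn.choose k * Nat.factorial k : Nat) : Int)

theorem pvCoef_zero (dn cn : Nat) : pvCoef dn cn 0 = 1 := by
  simp [pvCoef]

/-- the recurrence step computes the next closed-form coefficient exactly -/
theorem pvCoef_step (dn cn j : Nat) (hd : j + 1 ≤ dn) (hc : j + 1 ≤ cn) :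
    PySem.Int.floordiv
      (pvCoef dn cn j * ((dn : Int) - ((j : Int) + 1) + 1) * ((cn : Int) - ((j : Int) + 1) + 1))
      ((j : Int) + 1) = pvCoef dn cn (j + 1) := by
  have h1 : (dn : Int) - ((j : Int) + 1) + 1 = ((dn - j : Nat) : Int) := by
    have hj : j ≤ dn := by omega
    push_cast [hj]; ring
  have h2 : (cn : Int) - ((j : Int) + 1) + 1 = ((cn - j : Nat) : Int) := by
    have hj : j ≤ cn := by omega
    push_cast [hj]; ring
  rw [h1, h2]
  have hD : dn.choose j * (dn - j) = dn.choose (j+1) * (j+1) := (Nat.choose_succ_right_eq dn j).symm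
  have hC : cn.choose j * (cn - j) = cn.choose (j+1) * (j+1) := (Nat.choose_succ_right_eq cn j).symm
  have hprod : pvCoef dn cn j * ((dn - j : Nat) : Int) * ((cn - j : Nat) : Int)
      = (((dn.choose (j+1) * cn.choose (j+1) * Nat.factorial (j+1)) * (j+1) : Nat) : Int) := by
    unfold pvCoef
    have : (dn.choose j * cn.choose j * Nat.factorial j) * (dn - j) * (cn - j)
        = (dn.choose (j+1) * cn.choose (j+1) * Nat.factorial (j+1)) * (j+1) := by
      calc (dn.choose j * cn.choose j * Nat.factorial j) * (dn - j) * (cn - j)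
          = (dn.choose j * (dn - j)) * (cn.choose j * (cn - j)) * Nat.factorial j := by ring
        _ = (dn.choose (j+1) * (j+1)) * (cn.choose (j+1) * (j+1)) * Nat.factorial j := by rw [hD, hC]
        _ = (dn.choose (j+1) * cn.choose (j+1) * ((j+1) * Nat.factorial j)) * (j+1) := by ring
        _ = _ := by rw [Nat.factorial_succ]
    push_cast [← this]
    ring
  rw [hprod]
  have hcast : ((j : Int) + 1) = (((j + 1 : Nat)) : Int) := by push_cast; ring
  rw [hcast, PySem.Int.floordiv_natCast]
  rw [Nat.mul_div_cancel _ (by omega)]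
  rfl

/-- loop invariant: after processing range(1, j+1), the first j+1 cells hold the
closed-form coefficients and the rest are still 1 -/
theorem pvLoop (dn cn : Nat) (n : Nat) (hdn : n ≤ dn) (hcn : n ≤ cn) (j : Nat) (hj : j ≤ n) :
    (PySem.List.pyRange 1 ((j : Int) + 1) 1).foldl
      (fun cs k =>
        cs.set k.toNat
          (PySem.Int.floordiv (PySem.List.pyGetD cs (k - 1) 0 * ((dn : Int) - k + 1) * ((cn : Int) - k + 1)) k))
      (List.replicate (n + 1) 1)
    = (List.range (j + 1)).map (pvCoef dn cn) ++ List.replicate (n - j) 1 := by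
  induction j with
  | zero =>
    rw [PySem.List.pyRange_one_eq_nil (by norm_num)]
    simp [pvCoef_zero, List.replicate_succ]
  | succ j ih =>
    have hj' : j ≤ n := by omega
    have hsplit : PySem.List.pyRange 1 ((j : Int) + 1 + 1) 1
        = PySem.List.pyRange 1 ((j : Int) + 1) 1 ++ [(j : Int) + 1] := by
      have := PySem.List.pyRange_one_succ_right (a := 1) (b := (j : Int) + 1) (by omega)
      simpa using this
    rw [show (((j + 1 : Nat) : Int) + 1) = ((j : Int) + 1 + 1) by push_cast; ring, hsplit,
      List.foldl_append, ih hj']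
    -- now apply the single step at k = j+1
    set A := (List.range (j + 1)).map (pvCoef dn cn) with hA
    have hAlen : A.length = j + 1 := by simp [hA]
    have hrep : List.replicate (n - j) (1 : Int) = 1 :: List.replicate (n - (j + 1)) 1 := by
      have : n - j = (n - (j + 1)) + 1 := by omega
      rw [this, List.replicate_succ]
    simp only [List.foldl_cons, List.foldl_nil]
    have hget : PySem.List.pyGetD (A ++ List.replicate (n - j) 1) ((j : Int) + 1 - 1) 0
        = pvCoef dn cn j := by
      have h0 : ((j : Int) + 1 - 1) = ((j : Nat) : Int) := by ring
      rw [h0, PySem.List.pyGetD_of_nonneg _ _ (by omega)]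
      have hlt : j < (A ++ List.replicate (n - j) 1).length := by
        simp [hAlen]; omega
      rw [show ((j : Nat) : Int).toNat = j by omega]
      rw [List.getD_eq_getElem _ _ hlt, List.getElem_append_left (by omega)]
      simp [hA]
    have hsetIdx : (((j : Int) + 1)).toNat = j + 1 := by omega
    rw [hget, hsetIdx, hrep, List.set_append_right _ _ (by omega)]
    rw [show j + 1 - A.length = 0 by omega]
    have hstep := pvCoef_step dn cn j (by omega) (by omega)
    simp only [List.set_cons_zero, hstep]
    rw [List.range_succ (n := j + 1), List.map_append]
    simp [hA]

/-- assembling the output: enumerating a range-map equals mapping over the range -/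
theorem pvEnumMap (g : Nat → Int) (h : Int → Int × Int) (N : Nat) :
    (PySem.List.enumerate ((List.range N).map g) 0).map (fun p => (p.2, h p.1))
    = (List.range N).map (fun k => (g k, h (k : Int))) := by
  apply List.ext_getElem
  · simp [PySem.List.length_enumerate]
  · intro i h1 h2
    have hiN : i < N := by simpa [PySem.List.length_enumerate] using h1
    simp [PySem.List.getElem_enumerate]

-- ===== VERDICT (by name: the statement is the Claim_ definition above) =====
theorem motion_mul_py_spec : Claim_equal_motion_mul_py := by
  intro left right _
  unfold Spec_motion_mul_py motion_mul_py motion_mul_py_alt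
  obtain ⟨cl, dl⟩ := left
  obtain ⟨cr, dr⟩ := right
  dsimp only
  by_cases hdl : dl = 0
  · subst hdl; simp
  · by_cases hcr : cr = 0
    · subst hcr; simp [hdl]
    · rw [if_neg hdl, if_neg hcr, if_neg (by tauto : ¬(dl = 0 ∨ cr = 0))]
      set m : Int := if dl < cr then dl else cr with hm
      by_cases hpos : 1 ≤ m
      · -- main case: dl ≥ 1, cr ≥ 1
        have hdl1 : 1 ≤ dl := by rw [hm] at hpos; revert hpos; split <;> omega
        have hcr1 : 1 ≤ cr := by rw [hm] at hpos; revert hpos; split <;> omega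
        set n : Nat := m.toNat with hn
        have hmn : m = (n : Int) := by omega
        have hdlcast : dl = ((dl.toNat : Nat) : Int) := by omega
        have hcrcast : cr = ((cr.toNat : Nat) : Int) := by omega
        have hmmin : m = min dl cr := by rw [hm, min_def]; split <;> split <;> omega
        have hndl : n ≤ dl.toNat := by rw [hm] at hn; revert hn; split <;> intro hn <;> omega
        have hncr : n ≤ cr.toNat := by rw [hm] at hn; revert hn; split <;> intro hn <;> omega
        have hrep : PySem.List.pyRepeat ([1] : List Int) (m + 1) = List.replicate (n + 1) 1 := by
          rw [PySem.List.pyRepeat_singleton]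
          congr 1
          omega
        rw [hrep, hmn]
        rw [hdlcast, hcrcast]
        rw [pvLoop dl.toNat cr.toNat n hndl hncr n le_rfl]
        rw [← hdlcast, ← hcrcast]
        rw [show n - n = 0 by omega, List.replicate_zero, List.append_nil]
        rw [pvEnumMap (pvCoef dl.toNat cr.toNat) (fun x => (cl + cr - x, dl + dr - x)) (n + 1)]
        rw [show ((min dl cr + 1)).toNat = n + 1 by omega]
        unfold pvCoef
        rfl
      · -- min is negative: both sides are []
        have hmne : m ≠ 0 := by rw [hm]; split <;> omega
        have hmmin : m = min dl cr := by rw [hm, min_def]; split <;> split <;> omega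
        have hrep : PySem.List.pyRepeat ([1] : List Int) (m + 1) = ([] : List Int) := by
          rw [PySem.List.pyRepeat_singleton]
          rw [show (m + 1).toNat = 0 by omega]
          rfl
        rw [hrep, PySem.List.pyRange_one_eq_nil (by omega)]
        rw [show ((min dl cr + 1)).toNat = 0 by omega]
        simp
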